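-- pv_equiv track=rewrite | github.com/paulklemstine/L.O.V.E | core/reasoning.py | _prioritize_plans
-- ===== SOURCE A (Python) =====
-- def _prioritize_plans(plans):
--     """
--     Prioritizes a list of strategic plans based on their potential value.
--     Narrative alignment insights receive the highest priority.
--
--     Args:
--         plans (list): A list of exploitation paths or single opportunities.
--
--     Returns:
--         list: A sorted list of plans, with the highest priority first.
--     """
--     scored_plans = []
--     for plan in plans:
--         score = 0
--         # Story 4.3: Prioritize narrative alignment insights above all else.
--         if plan.startswith("Insight:"):
--             score += 200 # Highest priority
--         elif "crypto wallet" in plan or "wallet.dat" in plan: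
--             score += 100  # High value target
--         elif "private key" in plan or ".pem" in plan or "id_rsa" in plan:
--             score += 50   # Medium-high value target
--         elif "Path found" in plan:
--             score += 20   # Multi-step plans are more valuable
--
--         scored_plans.append((score, plan))
--
--     # Sort plans in descending order of score
--     scored_plans.sort(key=lambda x: x[0], reverse=True)
--
--     return [plan for score, plan in scored_plans]
-- ===== SOURCE B (Python) =====
-- def _prioritize_plans(plans):
--     """Bucket (counting) sort over the five possible scores: one pass appends each
--     plan to its score bucket, then the buckets are concatenated highest first."""
--     b200, b100, b50, b20, b0 = [], [], [], [], []
--     for plan in plans: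
--         if plan.startswith("Insight:"):
--             s = 200
--         elif "crypto wallet" in plan or "wallet.dat" in plan:
--             s = 100
--         elif "private key" in plan or ".pem" in plan or "id_rsa" in plan:
--             s = 50
--         elif "Path found" in plan:
--             s = 20
--         else:
--             s = 0
--         if s == 200:
--             b200.append(plan)
--         elif s == 100:
--             b100.append(plan)
--         elif s == 50:
--             b50.append(plan)
--         elif s == 20:
--             b20.append(plan)
--         else:
--             b0.append(plan)
--     return b200 + b100 + b50 + b20 + b0
-- ===== Notes on version B (the rewrite author's own statement) =====
-- stated objective: alternative
-- what changed: Replaces the build-score-tuples-then-stable-reverse-sort with a single-pass bucket (counting) sort over the five possible scores, concatenating the buckets highest score first; stability within a score is the bucket's insertion order.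
import Mathlib
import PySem

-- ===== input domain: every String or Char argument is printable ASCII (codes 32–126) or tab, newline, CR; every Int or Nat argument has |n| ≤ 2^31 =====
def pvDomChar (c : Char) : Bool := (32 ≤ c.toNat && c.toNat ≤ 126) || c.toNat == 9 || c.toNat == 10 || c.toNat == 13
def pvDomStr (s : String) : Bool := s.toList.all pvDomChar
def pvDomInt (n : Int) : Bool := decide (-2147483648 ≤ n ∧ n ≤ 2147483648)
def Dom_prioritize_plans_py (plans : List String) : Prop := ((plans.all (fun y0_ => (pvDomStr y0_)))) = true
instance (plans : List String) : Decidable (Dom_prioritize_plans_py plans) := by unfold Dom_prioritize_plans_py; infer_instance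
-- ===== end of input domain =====

-- B replaces A's build-score-tuples-then-stable-reverse-sort by a one-pass bucket sort
-- over the five possible scores (objective: alternative algorithm; not measurably faster).


-- ===== PORT A =====
-- A's if/elif scoring chain: score starts at 0 and exactly one branch (or none) adds to it
def pvScoreA (plan : String) : Int :=
  if PySem.Str.startswith plan "Insight:" then 0 + 200
  else if PySem.Str.isIn "crypto wallet" plan || PySem.Str.isIn "wallet.dat" plan then 0 + 100
  else if PySem.Str.isIn "private key" plan || PySem.Str.isIn ".pem" plan || PySem.Str.isIn "id_rsa" plan then 0 + 50
  else if PySem.Str.isIn "Path found" plan then 0 + 20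
  else 0

def prioritize_plans_py (plans : List String) : List String :=
  let scored_plans := plans.foldl (fun acc plan => acc ++ [(pvScoreA plan, plan)]) ([] : List (Int × String))
  (PySem.List.sorted scored_plans (fun x => x.1) true).map (fun x => x.2)

-- ===== PORT B =====
-- B's identical if/elif scoring chain (direct assignment of the score)
def pvScoreB (plan : String) : Int :=
  if PySem.Str.startswith plan "Insight:" then 200
  else if PySem.Str.isIn "crypto wallet" plan || PySem.Str.isIn "wallet.dat" plan then 100
  else if PySem.Str.isIn "private key" plan || PySem.Str.isIn ".pem" plan || PySem.Str.isIn "id_rsa" plan then 50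
  else if PySem.Str.isIn "Path found" plan then 20
  else 0

-- one loop iteration of B: append the plan to the bucket of its score
def pvStepB (b : List String × List String × List String × List String × List String)
    (plan : String) : List String × List String × List String × List String × List String :=
  let s := pvScoreB plan
  if s = 200 then (b.1 ++ [plan], b.2.1, b.2.2.1, b.2.2.2.1, b.2.2.2.2)
  else if s = 100 then (b.1, b.2.1 ++ [plan], b.2.2.1, b.2.2.2.1, b.2.2.2.2)
  else if s = 50 then (b.1, b.2.1, b.2.2.1 ++ [plan], b.2.2.2.1, b.2.2.2.2)
  else if s = 20 then (b.1, b.2.1, b.2.2.1, b.2.2.2.1 ++ [plan], b.2.2.2.2)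
  else (b.1, b.2.1, b.2.2.1, b.2.2.2.1, b.2.2.2.2 ++ [plan])

def prioritize_plans_py_alt (plans : List String) : List String :=
  let b := plans.foldl pvStepB ([], [], [], [], [])
  b.1 ++ b.2.1 ++ b.2.2.1 ++ b.2.2.2.1 ++ b.2.2.2.2

-- ===== PRECONDITION & SPEC =====
def Spec_prioritize_plans_py (plans : List String) (out : List String) : Prop := out = prioritize_plans_py_alt plans
instance (plans : List String) (out : List String) : Decidable (Spec_prioritize_plans_py plans out) := by unfold Spec_prioritize_plans_py; infer_instance

-- ===== CLAIM (what is proved, stated in full; the proofs are below) =====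
def Claim_equal_prioritize_plans_py : Prop := ∀ (plans : List String), Dom_prioritize_plans_py plans → Spec_prioritize_plans_py plans (prioritize_plans_py plans)

-- ===== LEMMAS AND PROOFS =====

-- the comparator A's stable reverse sort (insertion-sort form) uses on the score component
def pvBef (x y : Int × String) : Bool := decide (y.1 < x.1)

-- the score bucket of a scored-tuple list / of a plan list
def pvF (c : Int) (xs : List (Int × String)) : List (Int × String) := xs.filter (fun x => x.1 == c)
def pvG (c : Int) (plans : List String) : List String := plans.filter (fun p => pvScoreB p == c)

theorem pvScore_eq : pvScoreA = pvScoreB := by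
  funext p; simp only [pvScoreA, pvScoreB, zero_add]

theorem pvScore_cases (p : String) :
    pvScoreB p = 200 ∨ pvScoreB p = 100 ∨ pvScoreB p = 50 ∨ pvScoreB p = 20 ∨ pvScoreB p = 0 := by
  unfold pvScoreB; split_ifs <;> simp

theorem insertBy_skip (x : Int × String) (l r : List (Int × String))
    (h : ∀ y ∈ l, pvBef x y = false) :
    PySem.List.insertBy pvBef x (l ++ r) = l ++ PySem.List.insertBy pvBef x r := by
  induction l with
  | nil => simp
  | cons a t ih =>
    have ha := h a (by simp)
    simp [PySem.List.insertBy, ha, ih (fun y hy => h y (by simp [hy]))]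

theorem insertBy_front (x : Int × String) (r : List (Int × String))
    (h : ∀ y ∈ r, pvBef x y = true) :
    PySem.List.insertBy pvBef x r = x :: r := by
  cases r with
  | nil => simp [PySem.List.insertBy]
  | cons a t => simp [PySem.List.insertBy, h a (by simp)]

-- inserting one scored element into the five-bucket concatenation appends it to its bucket
theorem insert_step (x : Int × String) (A B C D E : List (Int × String))
    (hA : ∀ y ∈ A, y.1 = 200) (hB : ∀ y ∈ B, y.1 = 100) (hC : ∀ y ∈ C, y.1 = 50)
    (hD : ∀ y ∈ D, y.1 = 20) (hE : ∀ y ∈ E, y.1 = 0)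
    (hx : x.1 = 200 ∨ x.1 = 100 ∨ x.1 = 50 ∨ x.1 = 20 ∨ x.1 = 0) :
    PySem.List.insertBy pvBef x (A ++ B ++ C ++ D ++ E) =
      (A ++ (if x.1 == 200 then [x] else [])) ++
      (B ++ (if x.1 == 100 then [x] else [])) ++
      (C ++ (if x.1 == 50 then [x] else [])) ++
      (D ++ (if x.1 == 20 then [x] else [])) ++
      (E ++ (if x.1 == 0 then [x] else [])) := by
  rcases hx with hx | hx | hx | hx | hx
  · rw [show A ++ B ++ C ++ D ++ E = A ++ (B ++ C ++ D ++ E) by simp]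
    rw [insertBy_skip x A _ (fun y hy => by simp only [pvBef]; rw [hA y hy, hx]; decide),
        insertBy_front x _ (fun y hy => by
          simp only [pvBef]
          simp only [List.mem_append] at hy
          rcases hy with ((h | h) | h) | h
          · rw [hB y h, hx]; decide
          · rw [hC y h, hx]; decide
          · rw [hD y h, hx]; decide
          · rw [hE y h, hx]; decide)]
    simp [hx]
  · rw [show A ++ B ++ C ++ D ++ E = (A ++ B) ++ (C ++ D ++ E) by simp]
    rw [insertBy_skip x _ _ (fun y hy => by
          simp only [pvBef]
          rcases List.mem_append.mp hy with h | h
          · rw [hA y h, hx]; decide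
          · rw [hB y h, hx]; decide),
        insertBy_front x _ (fun y hy => by
          simp only [pvBef]
          simp only [List.mem_append] at hy
          rcases hy with (h | h) | h
          · rw [hC y h, hx]; decide
          · rw [hD y h, hx]; decide
          · rw [hE y h, hx]; decide)]
    simp [hx]
  · rw [show A ++ B ++ C ++ D ++ E = (A ++ B ++ C) ++ (D ++ E) by simp]
    rw [insertBy_skip x _ _ (fun y hy => by
          simp only [pvBef]
          simp only [List.mem_append] at hy
          rcases hy with (h | h) | h
          · rw [hA y h, hx]; decide
          · rw [hB y h, hx]; decide
          · rw [hC y h, hx]; decide),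
        insertBy_front x _ (fun y hy => by
          simp only [pvBef]
          rcases List.mem_append.mp hy with h | h
          · rw [hD y h, hx]; decide
          · rw [hE y h, hx]; decide)]
    simp [hx]
  · rw [show A ++ B ++ C ++ D ++ E = (A ++ B ++ C ++ D) ++ E by simp]
    rw [insertBy_skip x _ _ (fun y hy => by
          simp only [pvBef]
          simp only [List.mem_append] at hy
          rcases hy with ((h | h) | h) | h
          · rw [hA y h, hx]; decide
          · rw [hB y h, hx]; decide
          · rw [hC y h, hx]; decide
          · rw [hD y h, hx]; decide),
        insertBy_front x E (fun y hy => by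
          simp only [pvBef]; rw [hE y hy, hx]; decide)]
    simp [hx]
  · rw [show A ++ B ++ C ++ D ++ E = (A ++ B ++ C ++ D ++ E) ++ ([] : List (Int × String)) by simp]
    rw [insertBy_skip x _ _ (fun y hy => by
          simp only [pvBef]
          simp only [List.mem_append] at hy
          rcases hy with (((h | h) | h) | h) | h
          · rw [hA y h, hx]; decide
          · rw [hB y h, hx]; decide
          · rw [hC y h, hx]; decide
          · rw [hD y h, hx]; decide
          · rw [hE y h, hx]; decide)]
    simp [PySem.List.insertBy, hx]

theorem pvF_mem (c : Int) (xs : List (Int × String)) : ∀ y ∈ pvF c xs, y.1 = c := by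
  intro y hy
  simp only [pvF, List.mem_filter, beq_iff_eq] at hy
  exact hy.2

-- A's stable reverse sort of a five-valued-score list is the bucket concatenation
theorem sort_buckets (xs : List (Int × String))
    (h : ∀ x ∈ xs, x.1 = 200 ∨ x.1 = 100 ∨ x.1 = 50 ∨ x.1 = 20 ∨ x.1 = 0) :
    PySem.List.sorted xs (fun x => x.1) true =
      pvF 200 xs ++ pvF 100 xs ++ pvF 50 xs ++ pvF 20 xs ++ pvF 0 xs := by
  rw [PySem.List.sorted_rev_eq_foldl_insertBy]
  have hbef : (fun (acc : List (Int × String)) (x : Int × String) =>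
      PySem.List.insertBy (fun a b => decide ((fun x : Int × String => x.1) b < (fun x : Int × String => x.1) a)) x acc)
      = (fun acc x => PySem.List.insertBy pvBef x acc) := rfl
  rw [hbef]
  induction xs using List.reverseRecOn with
  | nil => simp [pvF]
  | append_singleton xs x ih =>
    rw [List.foldl_append, List.foldl_cons, List.foldl_nil,
        ih (fun y hy => h y (by simp [hy])),
        insert_step x _ _ _ _ _ (pvF_mem 200 xs) (pvF_mem 100 xs) (pvF_mem 50 xs)
          (pvF_mem 20 xs) (pvF_mem 0 xs) (h x (by simp))]
    simp [pvF, List.filter_append, List.filter_singleton, Bool.cond_eq_ite]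

-- B's loop appends each plan to the bucket of its score
theorem foldl_stepB (plans : List String) :
    ∀ acc : List String × List String × List String × List String × List String,
      plans.foldl pvStepB acc =
        (acc.1 ++ pvG 200 plans, acc.2.1 ++ pvG 100 plans, acc.2.2.1 ++ pvG 50 plans,
         acc.2.2.2.1 ++ pvG 20 plans, acc.2.2.2.2 ++ pvG 0 plans) := by
  induction plans with
  | nil => intro acc; simp [pvG]
  | cons p rest ih =>
    intro acc
    rw [List.foldl_cons, ih]
    rcases pvScore_cases p with hp | hp | hp | hp | hp <;>
      simp [pvStepB, pvG, hp]

theorem score_tuple_filter (c : Int) (plans : List String) :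
    pvF c (plans.map (fun p => (pvScoreA p, p))) =
      (pvG c plans).map (fun p => (pvScoreA p, p)) := by
  simp only [pvF, pvG, List.filter_map, pvScore_eq]
  rfl

-- ===== VERDICT (by name: the statement is the Claim_ definition above) =====
theorem prioritize_plans_py_spec : Claim_equal_prioritize_plans_py := by
  intro plans _
  show prioritize_plans_py plans = prioritize_plans_py_alt plans
  unfold prioritize_plans_py prioritize_plans_py_alt
  rw [PySem.List.foldl_append_singleton_eq_map, foldl_stepB]
  simp only [List.nil_append]
  rw [sort_buckets _ (by
    intro x hx
    rcases List.mem_map.mp hx with ⟨p, _, rfl⟩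
    simpa [pvScore_eq] using pvScore_cases p)]
  simp only [score_tuple_filter, List.map_append, List.map_map]
  simp [Function.comp_def]
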